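-- pv_equiv track=rewrite | github.com/simon2326/rag-salud-mental-universidad | src/clases_textos.py | _chunk_spans
-- ===== SOURCE A (Python) =====
-- from typing import Any, Dict, Iterable, List, Optional, Sequence
--
-- def _chunk_spans(length: int, chunk_size: int, overlap: int) -> List[tuple[int, int]]:
--     """Devuelve los intervalos de tokens que conforman cada chunk."""
--     spans: List[tuple[int, int]] = []
--     step = max(1, chunk_size - overlap)
--     for start in range(0, length, step):
--         end = min(start + chunk_size, length)
--         spans.append((start, end))
--         if end >= length:
--             break
--     return spans
-- ===== SOURCE B (Python) =====
-- from typing import List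
--
--
-- def _chunk_spans(length: int, chunk_size: int, overlap: int) -> List[tuple[int, int]]:
--     """Closed-form span count + one flat comprehension instead of iterate/append/break."""
--     if length <= 0:
--         return []
--     step = max(1, chunk_size - overlap)
--     n_range = -(-length // step)                              # ceil(length/step): range exhaustion
--     n_break = max(0, -(-(length - chunk_size) // step)) + 1   # first span reaching the end
--     n = min(n_range, n_break)
--     return [(i * step, min(i * step + chunk_size, length)) for i in range(n)]
-- ===== Notes on version B (the rewrite author's own statement) =====
-- stated objective: alternative
-- what changed: Replaces the iterate-append-test-break loop by a closed-form span count (min of the ceil range-exhaustion count and the ceil early-break count) followed by a single flat list comprehension.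
import Mathlib
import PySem

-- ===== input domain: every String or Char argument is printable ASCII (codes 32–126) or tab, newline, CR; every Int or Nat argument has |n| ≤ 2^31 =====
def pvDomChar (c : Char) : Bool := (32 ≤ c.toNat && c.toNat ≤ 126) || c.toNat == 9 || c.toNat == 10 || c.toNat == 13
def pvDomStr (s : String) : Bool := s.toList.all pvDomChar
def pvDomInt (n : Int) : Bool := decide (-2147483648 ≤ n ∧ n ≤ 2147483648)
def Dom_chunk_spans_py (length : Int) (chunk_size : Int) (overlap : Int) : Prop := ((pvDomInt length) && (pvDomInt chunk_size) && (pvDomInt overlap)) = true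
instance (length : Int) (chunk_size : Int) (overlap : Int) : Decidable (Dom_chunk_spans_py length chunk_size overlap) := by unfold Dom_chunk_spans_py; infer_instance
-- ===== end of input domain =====

-- ===== PORT A =====
-- B changes only the control flow (closed-form count + flat generation vs iterate/break); objective: alternative.
-- loop body of A: 'for start in range(0, length, step): … break' (break = stop recursion)
def chunkLoopA (length : Int) (chunk_size : Int) : List Int → List (Int × Int)
  | [] => []
  | start :: rest =>
    let e := min (start + chunk_size) length
    if length ≤ e then [(start, e)]
    else (start, e) :: chunkLoopA length chunk_size rest

def chunk_spans_py (length : Int) (chunk_size : Int) (overlap : Int) : List (Int × Int) :=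
  let step := max 1 (chunk_size - overlap)
  chunkLoopA length chunk_size (PySem.List.pyRange 0 length step)

-- ===== PORT B =====
def chunk_spans_py_alt (length : Int) (chunk_size : Int) (overlap : Int) : List (Int × Int) :=
  if length ≤ 0 then []
  else
    let step := max 1 (chunk_size - overlap)
    let nRange := -(PySem.Int.floordiv (-length) step)
    let nBreak := max 0 (-(PySem.Int.floordiv (-(length - chunk_size)) step)) + 1
    let n := min nRange nBreak
    (PySem.List.pyRange 0 n 1).map (fun i => (i * step, min (i * step + chunk_size) length))

-- ===== PRECONDITION & SPEC =====
def Spec_chunk_spans_py (length : Int) (chunk_size : Int) (overlap : Int) (out : List (Int × Int)) : Prop := out = chunk_spans_py_alt length chunk_size overlap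
instance (length : Int) (chunk_size : Int) (overlap : Int) (out : List (Int × Int)) : Decidable (Spec_chunk_spans_py length chunk_size overlap out) := by unfold Spec_chunk_spans_py; infer_instance

-- ===== CLAIM (what is proved, stated in full; the proofs are below) =====
def Claim_equal_chunk_spans_py : Prop := ∀ (length : Int) (chunk_size : Int) (overlap : Int), Dom_chunk_spans_py length chunk_size overlap → Spec_chunk_spans_py length chunk_size overlap (chunk_spans_py length chunk_size overlap)

-- ===== LEMMAS AND PROOFS =====

-- For 0 < step, a number q with (q-1)*step < x ≤ q*step is the ceiling of x/step:
-- it decides x ≤ step*j for every j.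
lemma ceil_le_iff (step x q j : Int) (hs : 0 < step)
    (h1 : (q - 1) * step < x) (h2 : x ≤ q * step) : x ≤ step * j ↔ q ≤ j := by
  constructor
  · intro h
    have hlt : (q - 1) * step < j * step := by
      have hc : step * j = j * step := mul_comm _ _
      linarith
    have := lt_of_mul_lt_mul_right hlt hs.le
    omega
  · intro h
    have hm : q * step ≤ j * step := mul_le_mul_of_nonneg_right h hs.le
    have hc : step * j = j * step := mul_comm _ _
    linarith

-- (x + step - 1) / step also satisfies the ceiling bracket (for 0 < step).
lemma q1_bracket (step x : Int) (hs : 0 < step) :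
    ((x + step - 1) / step - 1) * step < x ∧ x ≤ ((x + step - 1) / step) * step := by
  set q := (x + step - 1) / step with hq
  have h := Int.mul_ediv_add_emod (x + step - 1) step
  have h0 := Int.emod_nonneg (x + step - 1) (ne_of_gt hs)
  have h1 := Int.emod_lt_of_pos (x + step - 1) hs
  constructor
  · have e : (q - 1) * step = step * q - step := by ring
    rw [e]; linarith
  · have e : q * step = step * q := mul_comm _ _
    rw [e]; linarith

-- Two numbers satisfying the ceiling bracket coincide.
lemma ceil_unique (step x a b : Int) (hs : 0 < step)
    (ha1 : (a - 1) * step < x) (ha2 : x ≤ a * step)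
    (hb1 : (b - 1) * step < x) (hb2 : x ≤ b * step) : a = b := by
  have k1 := (ceil_le_iff step x a b hs ha1 ha2).mp (by rw [mul_comm]; exact hb2)
  have k2 := (ceil_le_iff step x b a hs hb1 hb2).mp (by rw [mul_comm]; exact ha2)
  omega

-- The loop of A over the arithmetic progression step*j, step*(j+1), … equals the
-- closed-form map, cut at min(range exhaustion, first break index I).
lemma chunkLoopA_range (L c step : Int) (I : Nat)
    (hI : ∀ j : Nat, L ≤ step * (j : Int) + c ↔ I ≤ j) :
    ∀ (m j : Nat),
      chunkLoopA L c ((List.range m).map (fun k : Nat => step * ((j : Int) + (k : Int)))) =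
      (List.range (min m (I - j + 1))).map
        (fun k : Nat => (step * ((j : Int) + (k : Int)),
                         min (step * ((j : Int) + (k : Int)) + c) L)) := by
  intro m
  induction m with
  | zero => intro j; simp [chunkLoopA]
  | succ n ih =>
    intro j
    have hshift : ((fun k : Nat => step * ((j : Int) + (k : Int))) ∘ Nat.succ)
        = (fun k : Nat => step * (((j + 1 : Nat) : Int) + (k : Int))) := by
      funext k; simp only [Function.comp]; push_cast; ring
    rw [List.range_succ_eq_map, List.map_cons, List.map_map, hshift]
    simp only [chunkLoopA, Nat.cast_zero, add_zero]
    by_cases hbr : L ≤ step * (j : Int) + c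
    · rw [if_pos (le_min_iff.mpr ⟨hbr, le_refl L⟩)]
      have hIj : I ≤ j := (hI j).mp hbr
      have hcut : min (n + 1) (I - j + 1) = 1 := by omega
      rw [hcut]
      simp
    · rw [if_neg (by rw [le_min_iff]; tauto)]
      have hIj : j < I := by have := hI j; omega
      have hcut : min (n + 1) (I - j + 1) = min n (I - (j + 1) + 1) + 1 := by omega
      rw [ih (j + 1), hcut, List.range_succ_eq_map, List.map_cons, List.map_map]
      have hshift2 : ((fun k : Nat => (step * ((j : Int) + (k : Int)),
              min (step * ((j : Int) + (k : Int)) + c) L)) ∘ Nat.succ)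
          = (fun k : Nat => (step * (((j + 1 : Nat) : Int) + (k : Int)),
              min (step * (((j + 1 : Nat) : Int) + (k : Int)) + c) L)) := by
        funext k
        simp only [Function.comp]
        have : (j : Int) + ((Nat.succ k : Nat) : Int) = ((j + 1 : Nat) : Int) + (k : Int) := by
          push_cast; ring
        rw [this]
      rw [hshift2]
      simp

-- ===== VERDICT (by name: the statement is the Claim_ definition above) =====
theorem chunk_spans_py_spec : Claim_equal_chunk_spans_py := by
  intro L c o _
  unfold Spec_chunk_spans_py chunk_spans_py chunk_spans_py_alt
  dsimp only
  set step := max 1 (c - o) with hstep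
  have hs : 0 < step := lt_of_lt_of_le one_pos (le_max_left _ _)
  by_cases hL : L ≤ 0
  · rw [if_pos hL, PySem.List.pyRange_of_pos 0 L hs, if_neg (by omega)]
    simp [chunkLoopA]
  · rw [if_neg hL]
    replace hL : 0 < L := by omega
    -- B-side counts and their ceiling brackets
    set q2 := -(PySem.Int.floordiv (-(L - c)) step) with hq2
    obtain ⟨hb2a, hb2b⟩ := (PySem.Int.neg_floordiv_neg_eq_iff_of_pos hs).mp hq2.symm
    set nR := -(PySem.Int.floordiv (-L) step) with hnR
    obtain ⟨hb1a, hb1b⟩ := (PySem.Int.neg_floordiv_neg_eq_iff_of_pos hs).mp hnR.symm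
    set I : Nat := (max 0 q2).toNat with hIdef
    have hI : ∀ j : Nat, L ≤ step * (j : Int) + c ↔ I ≤ j := by
      intro j
      have h1 : L - c ≤ step * (j : Int) ↔ q2 ≤ (j : Int) :=
        ceil_le_iff step (L - c) q2 (j : Int) hs hb2a hb2b
      constructor
      · intro h
        have := h1.mp (by linarith)
        omega
      · intro h
        have : q2 ≤ (j : Int) := by omega
        have := h1.mpr this
        linarith
    -- A side: rewrite the range into the progression and apply the loop lemma
    rw [PySem.List.pyRange_of_pos 0 L hs, if_pos hL]
    set q1 := (L - 0 + step - 1) / step with hq1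
    have hfa : (fun k : Nat => (0 : Int) + step * (k : Int))
        = (fun k : Nat => step * (((0 : Nat) : Int) + (k : Int))) := by
      funext k; push_cast; ring
    rw [hfa, chunkLoopA_range L c step I hI q1.toNat 0]
    -- B side: range(0, n, 1) as a Nat range
    rw [PySem.List.pyRange_one, List.map_map]
    -- the two counts agree
    obtain ⟨hc1, hc2⟩ := q1_bracket step (L - 0) hs
    have hc1' : (q1 - 1) * step < L := by rw [hq1]; simpa using hc1
    have hc2' : L ≤ q1 * step := by rw [hq1]; simpa using hc2
    have hnRq1 : nR = q1 := ceil_unique step L nR q1 hs hb1a hb1b hc1' hc2'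
    have hq1pos : 1 ≤ q1 := by
      by_contra hcon
      replace hcon : q1 < 1 := by omega
      have : q1 * step ≤ 0 := mul_nonpos_of_nonpos_of_nonneg (by omega) hs.le
      have : L ≤ 0 := by have := hc2; simp at this; linarith
      omega
    have hcount : min q1.toNat (I - 0 + 1) = (min nR (max 0 q2 + 1) - 0).toNat := by
      omega
    rw [hcount]
    apply List.map_congr_left
    intro k _
    have hx : step * (((0 : Nat) : Int) + (k : Int)) = (0 + (k : Int)) * step := by
      push_cast; ring
    rw [hx]
    rfl
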